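-- pv_equiv track=rewrite | github.com/flyingaura/PythonLearning | ESP_project/data_files/file_normalization.py | SetFileFormat
-- ===== SOURCE A (Python) =====
-- def SetFileFormat(FileSuffix):
--     fformatdict = {'word':['doc','docx','wps'],'PPT':['ppt','pptx','dps'],'excel':['xls','xlsx','et'],
--                    'image':['bmp','gif','jpg','jpeg','tiff','psd','png','svg','pcx','dxf','wmf','emf','tga','eps'],
--                    'audio':['CD','OGG','MP3','ASF','WMA','WAV','RM','REAL','APE','MIDI','VQF'],
--                    'video':['aiff','avi','mov','mpeg','mpg','qt','ram','viv','ra','rmvb','asf','wmv','flv'],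
--                    'txt':['txt','rtf'],'webpage':['html','htm','asp','jsp','php','css','xml','xhtml','aspx'],
--                    'Email':['eml'],'PDF':['pdf']
--                    }
--     for key in fformatdict:
--         if(FileSuffix in fformatdict[key]):
--             return key
--
--     return 'others'
-- ===== SOURCE B (Python) =====
-- def SetFileFormat(FileSuffix):
--     table = [
--         ('word', 'doc docx wps'),
--         ('PPT', 'ppt pptx dps'),
--         ('excel', 'xls xlsx et'),
--         ('image', 'bmp gif jpg jpeg tiff psd png svg pcx dxf wmf emf tga eps'),
--         ('audio', 'CD OGG MP3 ASF WMA WAV RM REAL APE MIDI VQF'),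
--         ('video', 'aiff avi mov mpeg mpg qt ram viv ra rmvb asf wmv flv'),
--         ('txt', 'txt rtf'),
--         ('webpage', 'html htm asp jsp php css xml xhtml aspx'),
--         ('Email', 'eml'),
--         ('PDF', 'pdf'),
--     ]
--     index = {}
--     for category, suffixes in table:
--         for suffix in suffixes.split():
--             index.setdefault(suffix, category)
--     return index.get(FileSuffix, 'others')
-- ===== Notes on version B (the rewrite author's own statement) =====
-- stated objective: idiomatic
-- what changed: Replaces A's per-call scan over the category dict (a list-membership test inside each category) by a flat (category, space-separated suffixes) table from which a reverse suffix-to-category index is built with setdefault (first category wins, preserving A's order-sensitive resolution of the duplicate suffix 'asf'), followed by a single dict lookup falling back to the default category.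
import Mathlib
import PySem

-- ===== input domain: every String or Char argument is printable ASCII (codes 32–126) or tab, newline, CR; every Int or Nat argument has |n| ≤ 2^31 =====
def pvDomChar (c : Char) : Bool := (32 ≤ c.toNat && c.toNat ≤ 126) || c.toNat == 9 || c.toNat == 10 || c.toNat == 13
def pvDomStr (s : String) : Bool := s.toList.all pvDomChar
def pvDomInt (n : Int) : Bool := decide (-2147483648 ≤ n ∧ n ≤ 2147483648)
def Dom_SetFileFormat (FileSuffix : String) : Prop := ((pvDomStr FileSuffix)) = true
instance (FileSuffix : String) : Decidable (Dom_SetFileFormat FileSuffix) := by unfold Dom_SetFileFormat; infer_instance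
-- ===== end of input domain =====

-- B replaces A's per-call scan over the category dict by a flat (category, space-separated
-- suffixes) table, a reverse index built with setdefault (first category wins), and one lookup;
-- objective: idiomatic.

-- ===== PORT A =====
-- A's literal category dict, in its insertion order
def pvFFormat : List (String × List String) :=
  [("word", ["doc","docx","wps"]), ("PPT", ["ppt","pptx","dps"]), ("excel", ["xls","xlsx","et"]),
   ("image", ["bmp","gif","jpg","jpeg","tiff","psd","png","svg","pcx","dxf","wmf","emf","tga","eps"]),
   ("audio", ["CD","OGG","MP3","ASF","WMA","WAV","RM","REAL","APE","MIDI","VQF"]),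
   ("video", ["aiff","avi","mov","mpeg","mpg","qt","ram","viv","ra","rmvb","asf","wmv","flv"]),
   ("txt", ["txt","rtf"]), ("webpage", ["html","htm","asp","jsp","php","css","xml","xhtml","aspx"]),
   ("Email", ["eml"]), ("PDF", ["pdf"])]

-- the 'for key in fformatdict' loop with early return on 'FileSuffix in fformatdict[key]'
def pvLoopA (s : String) : List (String × List String) → String
  | [] => "others"
  | (k, v) :: rest => if s ∈ v then k else pvLoopA s rest

def SetFileFormat (FileSuffix : String) : String :=
  pvLoopA FileSuffix pvFFormat

-- ===== PORT B =====
-- B's flat table: each entry is a category with its suffixes in one space-separated string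
def pvTableB : List (String × String) :=
  [("word", "doc docx wps"),
   ("PPT", "ppt pptx dps"),
   ("excel", "xls xlsx et"),
   ("image", "bmp gif jpg jpeg tiff psd png svg pcx dxf wmf emf tga eps"),
   ("audio", "CD OGG MP3 ASF WMA WAV RM REAL APE MIDI VQF"),
   ("video", "aiff avi mov mpeg mpg qt ram viv ra rmvb asf wmv flv"),
   ("txt", "txt rtf"),
   ("webpage", "html htm asp jsp php css xml xhtml aspx"),
   ("Email", "eml"),
   ("PDF", "pdf")]

-- 'index.setdefault(suffix, category)' over 'suffixes.split()' for each table row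
def pvIndexB : PySem.Dict String String :=
  pvTableB.foldl
    (fun d row => (PySem.Str.split₀ row.2).foldl (fun d suffix => d.setdefault suffix row.1) d)
    PySem.Dict.empty

def SetFileFormat_alt (FileSuffix : String) : String :=
  pvIndexB.getD FileSuffix "others"

-- ===== PRECONDITION & SPEC =====
def Spec_SetFileFormat (FileSuffix : String) (out : String) : Prop := out = SetFileFormat_alt FileSuffix
instance (FileSuffix : String) (out : String) : Decidable (Spec_SetFileFormat FileSuffix out) := by unfold Spec_SetFileFormat; infer_instance

-- ===== CLAIM (what is proved, stated in full; the proofs are below) =====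
def Claim_equal_SetFileFormat : Prop := ∀ (FileSuffix : String), Dom_SetFileFormat FileSuffix → Spec_SetFileFormat FileSuffix (SetFileFormat FileSuffix)

-- ===== LEMMAS AND PROOFS =====

-- every suffix that occurs anywhere in A's table
def pvAllSuffixes : List String := (pvFFormat.map Prod.snd).flatten

-- A's loop returns 'others' when the suffix is in no category list
theorem pvLoopA_none (s : String) (items : List (String × List String))
    (h : ∀ p ∈ items, s ∉ p.2) : pvLoopA s items = "others" := by
  induction items with
  | nil => rfl
  | cons p rest ih =>
    obtain ⟨k, v⟩ := p
    simp only [pvLoopA, if_neg (h (k, v) (List.mem_cons_self))]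
    exact ih fun q hq => h q (List.mem_cons_of_mem _ hq)

-- building B's index never touches keys outside the split suffix lists
theorem pvBuildB_get?_none (s : String) (items : List (String × String))
    (d : PySem.Dict String String)
    (h : ∀ p ∈ items, s ∉ PySem.Str.split₀ p.2) :
    (items.foldl
      (fun d row => (PySem.Str.split₀ row.2).foldl (fun d suffix => d.setdefault suffix row.1) d)
      d).get? s = d.get? s := by
  induction items generalizing d with
  | nil => rfl
  | cons p rest ih =>
    obtain ⟨k, v⟩ := p
    rw [List.foldl_cons]
    rw [ih _ fun q hq => h q (List.mem_cons_of_mem _ hq)]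
    have hv : s ∉ PySem.Str.split₀ v := h (k, v) (List.mem_cons_self)
    clear ih h
    revert hv
    induction PySem.Str.split₀ v generalizing d with
    | nil => intro _; rfl
    | cons suf tl ihv =>
      intro hv
      rw [List.foldl_cons]
      rw [ihv _ (fun hm => hv (List.mem_cons_of_mem _ hm))]
      apply PySem.Dict.get?_setdefault_of_ne
      intro he
      exact hv (he ▸ List.mem_cons_self)

-- B's split suffix lists are exactly A's suffix lists, row by row
theorem pvTables_agree : pvTableB.map (fun p => PySem.Str.split₀ p.2) = pvFFormat.map Prod.snd := by
  decide

-- the finitely many suffixes that do occur: checked one by one by the kernel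
set_option maxRecDepth 16000 in
theorem pv_mem_eq : ∀ t ∈ pvAllSuffixes, pvLoopA t pvFFormat = pvIndexB.getD t "others" := by
  decide

-- ===== VERDICT (by name: the statement is the Claim_ definition above) =====
theorem SetFileFormat_spec : Claim_equal_SetFileFormat := by
  intro s _
  unfold Spec_SetFileFormat
  by_cases hs : s ∈ pvAllSuffixes
  · exact pv_mem_eq s hs
  · have hA : ∀ p ∈ pvFFormat, s ∉ p.2 := by
      intro p hp hmem
      exact hs (List.mem_flatten.mpr ⟨p.2, List.mem_map_of_mem hp, hmem⟩)
    have hB : ∀ p ∈ pvTableB, s ∉ PySem.Str.split₀ p.2 := by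
      intro p hp hmem
      apply hs
      refine List.mem_flatten.mpr ⟨PySem.Str.split₀ p.2, ?_, hmem⟩
      rw [← pvTables_agree]
      exact List.mem_map_of_mem hp
    rw [SetFileFormat, pvLoopA_none s _ hA]
    rw [SetFileFormat_alt, PySem.Dict.getD_eq_get?_getD, pvIndexB, pvBuildB_get?_none s _ _ hB]
    rfl
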